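-- pv_equiv track=rewrite | github.com/kjruan-highnote/lamplight-ai-agent | agents/ship-agent/src/unified_generator.py | _get_onboarding_steps
-- ===== SOURCE A (Python) =====
-- from typing import Dict, Any, List, Optional, Union
--
-- def _get_onboarding_steps(program_type: str, categories: Dict[str, List[str]]) -> List[str]:
--     """Get onboarding steps based on available operations"""
--     steps = []
--
--     if 'consumer' in program_type:
--         for ops in categories.values():
--             if 'CreatePersonAccountHolder' in ops:
--                 steps.append('CreatePersonAccountHolder')
--                 break
--     elif 'commercial' in program_type:
--         for ops in categories.values():
--             if 'CreateBusinessAccountHolder' in ops: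
--                 steps.append('CreateBusinessAccountHolder')
--                 break
--
--     common_steps = [
--         'CreateApplication',
--         'IssueFinancialAccount',
--         'IssuePaymentCard',
--         'ActivatePaymentCard'
--     ]
--
--     for step in common_steps:
--         for ops in categories.values():
--             if any(step in op for op in ops):
--                 steps.append(next(op for op in ops if step in op))
--                 break
--
--     return steps
-- ===== SOURCE B (Python) =====
-- def _get_onboarding_steps(program_type: str, categories) -> list:
--     """Get onboarding steps based on available operations"""
--     all_ops = [op for ops in categories.values() for op in ops]
--
--     if 'consumer' in program_type:
--         target = 'CreatePersonAccountHolder'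
--     elif 'commercial' in program_type:
--         target = 'CreateBusinessAccountHolder'
--     else:
--         target = None
--
--     steps = [target] if target is not None and target in all_ops else []
--
--     common_steps = [
--         'CreateApplication',
--         'IssueFinancialAccount',
--         'IssuePaymentCard',
--         'ActivatePaymentCard'
--     ]
--
--     first_match = {}
--     for op in all_ops:
--         for step in common_steps:
--             if step not in first_match and step in op:
--                 first_match[step] = op
--
--     steps.extend(first_match[s] for s in common_steps if s in first_match)
--     return steps
-- ===== Notes on version B (the rewrite author's own statement) =====
-- stated objective: alternative
-- what changed: B flattens all ops once and makes a single indexing pass that records, in a set-once dict, the first op containing each common step prefix, then assembles the result by lookup; A re-scans every category's ops separately for each of the four steps.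
import Mathlib
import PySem

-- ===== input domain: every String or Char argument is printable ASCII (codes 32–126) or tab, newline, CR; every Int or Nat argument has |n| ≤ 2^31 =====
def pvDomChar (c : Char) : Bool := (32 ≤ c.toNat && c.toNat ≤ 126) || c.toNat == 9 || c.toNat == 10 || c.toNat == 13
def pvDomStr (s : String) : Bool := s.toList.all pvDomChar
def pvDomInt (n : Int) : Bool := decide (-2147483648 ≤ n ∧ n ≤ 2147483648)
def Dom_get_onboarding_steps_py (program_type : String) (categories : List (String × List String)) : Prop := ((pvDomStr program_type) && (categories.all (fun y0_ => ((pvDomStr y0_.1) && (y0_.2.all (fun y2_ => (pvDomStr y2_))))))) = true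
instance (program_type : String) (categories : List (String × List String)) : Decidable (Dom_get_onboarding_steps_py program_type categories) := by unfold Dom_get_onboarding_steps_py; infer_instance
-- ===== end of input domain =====

-- B replaces A's per-step re-scanning of all categories by one flattening pass plus a
-- set-once dict index assembled by lookup; an alternative decomposition with the same results.

-- ===== PORT A =====
def get_onboarding_steps_py (program_type : String) (categories : List (String × List String)) : List String :=
  let steps : List String :=
    if PySem.Str.isIn "consumer" program_type then
      match categories.find? (fun kv => kv.2.contains "CreatePersonAccountHolder") with
      | some _ => ["CreatePersonAccountHolder"]
      | none => []
    else if PySem.Str.isIn "commercial" program_type then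
      match categories.find? (fun kv => kv.2.contains "CreateBusinessAccountHolder") with
      | some _ => ["CreateBusinessAccountHolder"]
      | none => []
    else []
  let common := ["CreateApplication", "IssueFinancialAccount", "IssuePaymentCard", "ActivatePaymentCard"]
  common.foldl (fun steps step =>
    match categories.findSome? (fun kv =>
        if kv.2.any (fun op => PySem.Str.isIn step op) then
          kv.2.find? (fun op => PySem.Str.isIn step op)
        else none) with
    | some op => steps ++ [op]
    | none => steps) steps

-- ===== PORT B =====
def get_onboarding_steps_py_alt (program_type : String) (categories : List (String × List String)) : List String :=
  let allOps := categories.flatMap (fun kv => kv.2)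
  let target : Option String :=
    if PySem.Str.isIn "consumer" program_type then some "CreatePersonAccountHolder"
    else if PySem.Str.isIn "commercial" program_type then some "CreateBusinessAccountHolder"
    else none
  let steps : List String :=
    match target with
    | some t => if allOps.contains t then [t] else []
    | none => []
  let common := ["CreateApplication", "IssueFinancialAccount", "IssuePaymentCard", "ActivatePaymentCard"]
  let fm : PySem.Dict String String :=
    allOps.foldl (fun d op =>
      common.foldl (fun d step =>
        if !(d.contains step) && PySem.Str.isIn step op then d.insert step op else d) d)
      PySem.Dict.empty
  steps ++ common.filterMap (fun s => fm.get? s)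

-- ===== PRECONDITION & SPEC =====
def Spec_get_onboarding_steps_py (program_type : String) (categories : List (String × List String)) (out : List String) : Prop := out = get_onboarding_steps_py_alt program_type categories
instance (program_type : String) (categories : List (String × List String)) (out : List String) : Decidable (Spec_get_onboarding_steps_py program_type categories out) := by unfold Spec_get_onboarding_steps_py; infer_instance

-- ===== CLAIM (what is proved, stated in full; the proofs are below) =====
def Claim_equal_get_onboarding_steps_py : Prop := ∀ (program_type : String) (categories : List (String × List String)), Dom_get_onboarding_steps_py program_type categories → Spec_get_onboarding_steps_py program_type categories (get_onboarding_steps_py program_type categories)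

-- ===== LEMMAS AND PROOFS =====

-- A's append-or-skip fold is init ++ filterMap.
theorem pv_foldl_app (g : String → Option String) (l : List String) (init : List String) :
    l.foldl (fun st step => match g step with | some op => st ++ [op] | none => st) init
      = init ++ l.filterMap g := by
  induction l generalizing init with
  | nil => simp
  | cons s rest ih =>
    cases h : g s <;> simp [List.foldl_cons, h, ih]

-- A's per-step category scan is find? over the flattened op list.
theorem pv_findSome_flat (p : String → Bool) (cats : List (String × List String)) :
    cats.findSome? (fun kv => if kv.2.any p then kv.2.find? p else none)
      = (cats.flatMap (fun kv => kv.2)).find? p := by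
  induction cats with
  | nil => rfl
  | cons kv rest ih =>
    rw [List.flatMap_cons, List.find?_append, List.findSome?_cons]
    cases hf : kv.2.find? p with
    | some v =>
      have hany : kv.2.any p = true :=
        List.any_eq_true.mpr ⟨v, List.mem_of_find?_eq_some hf, List.find?_some hf⟩
      rw [if_pos hany]
      rfl
    | none =>
      have hany : kv.2.any p = false :=
        List.any_eq_false.mpr (List.find?_eq_none.mp hf)
      rw [if_neg (by rw [hany]; exact Bool.false_ne_true), ih]
      rfl

-- one op's inner pass over the step list, seen through get? at one step key
theorem pv_inner (op step : String) (common : List String) (d : PySem.Dict String String) :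
    (common.foldl (fun d s =>
        if !(d.contains s) && PySem.Str.isIn s op then d.insert s op else d) d).get? step
      = if step ∈ common ∧ d.contains step = false ∧ PySem.Str.isIn step op = true then some op
        else d.get? step := by
  induction common generalizing d with
  | nil => simp
  | cons s rest ih =>
    rw [List.foldl_cons]
    by_cases hcond : (!(d.contains s) && PySem.Str.isIn s op) = true
    · rw [if_pos hcond, ih]
      have hc' : d.contains s = false := by
        have := (Bool.and_eq_true _ _).mp hcond
        simpa using this.1
      have hin : PySem.Str.isIn s op = true := ((Bool.and_eq_true _ _).mp hcond).2
      by_cases hs : step = s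
      · subst hs
        rw [if_neg (by
              rintro ⟨-, hcf, -⟩
              rw [PySem.Dict.contains_insert_self] at hcf
              simp at hcf),
            if_pos ⟨List.mem_cons_self, hc', hin⟩]
        exact PySem.Dict.get?_insert_self d step op
      · have hg : (d.insert s op).get? step = d.get? step :=
          PySem.Dict.get?_insert_of_ne d op hs
        have hcont : (d.insert s op).contains step = d.contains step := by
          rw [PySem.Dict.contains_insert]
          simp [beq_eq_false_iff_ne.mpr hs]
        rw [hg, hcont]
        by_cases hmem : step ∈ rest ∧ d.contains step = false ∧ PySem.Str.isIn step op = true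
        · rw [if_pos hmem, if_pos ⟨List.mem_cons_of_mem s hmem.1, hmem.2⟩]
        · rw [if_neg hmem, if_neg (by
              rintro ⟨h1, h2⟩
              exact hmem ⟨(List.mem_cons.mp h1).resolve_left hs, h2⟩)]
    · rw [if_neg hcond, ih]
      by_cases hs : step = s
      · subst hs
        have hno : ¬ (d.contains step = false ∧ PySem.Str.isIn step op = true) := by
          rintro ⟨h1, h2⟩
          exact hcond (by rw [h1, h2]; rfl)
        rw [if_neg (by rintro ⟨-, h2⟩; exact hno h2),
            if_neg (by rintro ⟨-, h2⟩; exact hno h2)]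
      · by_cases hmem : step ∈ rest ∧ d.contains step = false ∧ PySem.Str.isIn step op = true
        · rw [if_pos hmem, if_pos ⟨List.mem_cons_of_mem s hmem.1, hmem.2⟩]
        · rw [if_neg hmem, if_neg (by
              rintro ⟨h1, h2⟩
              exact hmem ⟨(List.mem_cons.mp h1).resolve_left hs, h2⟩)]

-- the whole indexing pass: fm.get? step is the first matching op
theorem pv_outer (step : String) (common : List String) (hstep : step ∈ common)
    (ops : List String) (d : PySem.Dict String String) :
    (ops.foldl (fun d op =>
        common.foldl (fun d s =>
          if !(d.contains s) && PySem.Str.isIn s op then d.insert s op else d) d) d).get? step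
      = (d.get? step).or (ops.find? (fun op => PySem.Str.isIn step op)) := by
  induction ops generalizing d with
  | nil => cases h : d.get? step <;> simp [h]
  | cons op rest ih =>
    rw [List.foldl_cons, ih, pv_inner, List.find?_cons]
    cases h : d.get? step with
    | some v =>
      have hc : d.contains step = true := by
        rw [PySem.Dict.contains_eq_isSome_get?, h]; rfl
      rw [if_neg (by rintro ⟨-, h1, -⟩; rw [hc] at h1; simp at h1)]
      cases hin : PySem.Str.isIn step op <;> simp
    | none =>
      have hc : d.contains step = false := by
        rw [PySem.Dict.contains_eq_isSome_get?, h]; rfl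
      cases hin : PySem.Str.isIn step op with
      | true =>
        rw [if_pos ⟨hstep, hc, rfl⟩]
        simp
      | false =>
        rw [if_neg (by rintro ⟨-, -, h2⟩; cases h2)]

-- ===== VERDICT (by name: the statement is the Claim_ definition above) =====
theorem get_onboarding_steps_py_spec : Claim_equal_get_onboarding_steps_py := by
  intro program_type categories _
  show get_onboarding_steps_py program_type categories = get_onboarding_steps_py_alt program_type categories
  unfold get_onboarding_steps_py get_onboarding_steps_py_alt
  rw [pv_foldl_app]
  have hfm : ∀ s ∈ (["CreateApplication", "IssueFinancialAccount", "IssuePaymentCard", "ActivatePaymentCard"] : List String),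
      categories.findSome? (fun kv => if kv.2.any (fun op => PySem.Str.isIn s op) then
          kv.2.find? (fun op => PySem.Str.isIn s op) else none)
        = ((categories.flatMap (fun kv => kv.2)).foldl (fun d op =>
            (["CreateApplication", "IssueFinancialAccount", "IssuePaymentCard", "ActivatePaymentCard"] : List String).foldl (fun d s =>
              if !(d.contains s) && PySem.Str.isIn s op then d.insert s op else d) d)
            PySem.Dict.empty).get? s := by
    intro s hs
    rw [pv_findSome_flat, pv_outer s _ hs, PySem.Dict.get?_empty]
    rfl
  rw [List.filterMap_congr hfm]
  congr 1
  by_cases h1 : PySem.Str.isIn "consumer" program_type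
  · rw [if_pos h1, if_pos h1]
    cases hfind : categories.find? (fun kv => kv.2.contains "CreatePersonAccountHolder") with
    | some kv =>
      have hm : "CreatePersonAccountHolder" ∈ List.flatMap (fun kv => kv.2) categories :=
        List.mem_flatMap.mpr ⟨kv, List.mem_of_find?_eq_some hfind,
          by simpa using List.find?_some hfind⟩
      simp [hm]
    | none =>
      have hno : ¬ "CreatePersonAccountHolder" ∈ List.flatMap (fun kv => kv.2) categories := by
        intro hmm
        rcases List.mem_flatMap.mp hmm with ⟨kv, hkv, ht⟩
        have := List.find?_eq_none.mp hfind kv hkv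
        simp only [List.contains_eq_mem, decide_eq_true_eq] at this
        exact this ht
      simp [hno]
  · rw [if_neg h1, if_neg h1]
    by_cases h2 : PySem.Str.isIn "commercial" program_type
    · rw [if_pos h2, if_pos h2]
      cases hfind : categories.find? (fun kv => kv.2.contains "CreateBusinessAccountHolder") with
      | some kv =>
        have hm : "CreateBusinessAccountHolder" ∈ List.flatMap (fun kv => kv.2) categories :=
          List.mem_flatMap.mpr ⟨kv, List.mem_of_find?_eq_some hfind,
            by simpa using List.find?_some hfind⟩
        simp [hm]
      | none =>
        have hno : ¬ "CreateBusinessAccountHolder" ∈ List.flatMap (fun kv => kv.2) categories := by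
          intro hmm
          rcases List.mem_flatMap.mp hmm with ⟨kv, hkv, ht⟩
          have := List.find?_eq_none.mp hfind kv hkv
          simp only [List.contains_eq_mem, decide_eq_true_eq] at this
          exact this ht
        simp [hno]
    · rw [if_neg h2, if_neg h2]
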